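-- pv_equiv track=rewrite | github.com/palbanese/ChimeraX_bundle | src/tool.py | file_id_generator
-- ===== SOURCE A (Python) =====
-- def file_id_generator(start, end):
--
--     # Creates file IDs for user-selected evidence files. The start
--     # index is specified, so that the generator does not start over
--     # every time new files are selected. The end index is pecified,
--     # so that the number of IDs created corresponds to the number
--     # of newly added files.
--
--     import string
--     import itertools
--
--     for i in itertools.count(1):
--         for p in itertools.product(string.ascii_uppercase, repeat=i):
--             start -= 1
--             if (end > 0 and start < 0):
--                 yield "".join(p)
--                 end -= 1
--             elif (end > 0 and start > -1):
--                 end -= 1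
--             else:
--                 break
--         if end < 1:
--             break
-- ===== SOURCE B (Python) =====
-- def file_id_generator(start, end):
--     # Unranking: yield Excel-style IDs number max(start,0)+1 .. end directly,
--     # each built independently by bijective base-26 digit extraction.
--     lo = start if start > 0 else 0
--     for n in range(lo + 1, end + 1):
--         s = ""
--         m = n
--         while m > 0:
--             m, r = divmod(m - 1, 26)
--             s = chr(65 + r) + s
--         yield s
-- ===== Notes on version B (the rewrite author's own statement) =====
-- stated objective: alternative
-- what changed: Replaces the scan that enumerates every ID from 'A' onward (skipping the first start of them and counting end down) by direct unranking: the yielded range is computed as max(start,0)+1..end and each ID is produced independently by bijective base-26 digit extraction.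
import Mathlib
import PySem

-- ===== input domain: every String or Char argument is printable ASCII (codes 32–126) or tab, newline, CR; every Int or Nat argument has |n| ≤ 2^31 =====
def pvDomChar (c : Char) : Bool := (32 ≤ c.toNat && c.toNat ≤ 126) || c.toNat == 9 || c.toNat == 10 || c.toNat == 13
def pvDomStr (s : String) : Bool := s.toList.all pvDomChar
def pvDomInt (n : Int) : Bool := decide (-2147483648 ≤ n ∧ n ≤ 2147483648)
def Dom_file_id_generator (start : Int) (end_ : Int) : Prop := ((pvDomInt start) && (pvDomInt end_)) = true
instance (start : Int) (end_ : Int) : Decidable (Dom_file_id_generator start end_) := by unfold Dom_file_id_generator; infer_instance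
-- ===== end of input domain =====

-- B replaces A's scan over every ID from 'A' onward by direct unranking (base-26
-- digit extraction of IDs max(start,0)+1 .. end), an alternative algorithm. Both
-- Python versions are generators; the equivalence is about the yielded sequence.

-- ===== PORT A =====
-- string.ascii_uppercase
def pvUppercase : List Char := "ABCDEFGHIJKLMNOPQRSTUVWXYZ".toList

-- itertools.product(string.ascii_uppercase, repeat=i) as a list, in product order
def pvProducts : Nat → List (List Char)
  | 0 => [[]]
  | n + 1 => pvUppercase.flatMap (fun c => (pvProducts n).map (fun p => c :: p))

-- the inner 'for p in itertools.product(...)' loop of A; state is (start, end,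
-- yields so far); it stops early (Python's break) exactly in the final else branch
def pvInner : List (List Char) → Int → Int → List String → Int × Int × List String
  | [], s, e, acc => (s, e, acc)
  | p :: ps, s, e, acc =>
    let s1 := s - 1
    if e > 0 ∧ s1 < 0 then pvInner ps s1 (e - 1) (acc ++ [String.mk p])
    else if e > 0 ∧ s1 > -1 then pvInner ps s1 (e - 1) acc
    else (s1, e, acc)

-- (needed by pvOuter's termination) every step of the inner loop that is not the
-- break decrements end, so a final end ≥ 1 means the whole list was consumed
theorem pvInner_e_drop : ∀ (ps : List (List Char)) (s e : Int) (acc : List String),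
    1 ≤ (pvInner ps s e acc).2.1 → (pvInner ps s e acc).2.1 + ps.length ≤ e := by
  intro ps
  induction ps with
  | nil => intro s e acc h; simp [pvInner]
  | cons p ps ih =>
    intro s e acc h
    simp only [pvInner] at h ⊢
    by_cases h1 : e > 0 ∧ s - 1 < 0
    · rw [if_pos h1] at h ⊢
      have := ih (s - 1) (e - 1) (acc ++ [String.mk p]) h
      simp only [List.length_cons] at *
      push_cast at *
      omega
    · rw [if_neg h1] at h ⊢
      by_cases h2 : e > 0 ∧ s - 1 > -1
      · rw [if_pos h2] at h ⊢
        have := ih (s - 1) (e - 1) acc h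
        simp only [List.length_cons] at *
        push_cast at *
        omega
      · rw [if_neg h2] at h ⊢
        simp only at h
        exfalso
        by_cases hs : s - 1 < 0
        · exact h1 ⟨by omega, hs⟩
        · exact h2 ⟨by omega, by omega⟩

-- (needed by pvOuter's termination)
theorem pvProducts_length (n : Nat) : (pvProducts n).length = 26 ^ n := by
  induction n with
  | zero => rfl
  | succ n ih =>
    simp only [pvProducts, List.length_flatMap]
    have hmap : pvUppercase.map (fun c => ((pvProducts n).map (fun p => c :: p)).length)
        = pvUppercase.map (fun _ => 26 ^ n) := by
      apply List.map_congr_left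
      intro c _
      simp [ih]
    rw [hmap, List.map_const', List.sum_replicate]
    have h26 : pvUppercase.length = 26 := by decide
    rw [h26, smul_eq_mul, pow_succ]
    ring

-- the outer 'for i in itertools.count(1)' loop of A, entered at level i
def pvOuter (i : Nat) (s e : Int) (acc : List String) : List String :=
  if h : (pvInner (pvProducts i) s e acc).2.1 < 1 then (pvInner (pvProducts i) s e acc).2.2
  else pvOuter (i + 1) (pvInner (pvProducts i) s e acc).1
        (pvInner (pvProducts i) s e acc).2.1 (pvInner (pvProducts i) s e acc).2.2
termination_by e.toNat
decreasing_by
  have h1 : 1 ≤ (pvInner (pvProducts i) s e acc).2.1 := by omega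
  have h2 := pvInner_e_drop (pvProducts i) s e acc h1
  have h3 : 0 < (pvProducts i).length := by
    rw [pvProducts_length]
    positivity
  omega

def file_id_generator (start : Int) (end_ : Int) : List String :=
  pvOuter 1 start end_ []

-- ===== PORT B =====
-- the 'while m > 0' loop of Source B: m, r = divmod(m - 1, 26); s = chr(65 + r) + s
def pvUnrankAux : Nat → List Char → List Char
  | 0, acc => acc
  | m + 1, acc => pvUnrankAux (m / 26) (Char.ofNat (65 + m % 26) :: acc)
decreasing_by exact Nat.lt_succ_of_le (Nat.div_le_self m 26)

def file_id_generator_alt (start : Int) (end_ : Int) : List String :=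
  let lo : Int := if start > 0 then start else 0
  (PySem.List.pyRange (lo + 1) (end_ + 1) 1).map (fun n => String.mk (pvUnrankAux n.toNat []))

-- ===== PRECONDITION & SPEC =====
def Spec_file_id_generator (start : Int) (end_ : Int) (out : List String) : Prop := out = file_id_generator_alt start end_
instance (start : Int) (end_ : Int) (out : List String) : Decidable (Spec_file_id_generator start end_ out) := by unfold Spec_file_id_generator; infer_instance

-- ===== CLAIM (what is proved, stated in full; the proofs are below) =====
def Claim_equal_file_id_generator : Prop := ∀ (start : Int) (end_ : Int), Dom_file_id_generator start end_ → Spec_file_id_generator start end_ (file_id_generator start end_)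

-- ===== LEMMAS AND PROOFS =====

-- number of IDs strictly shorter than j+1 letters: pvPre j = 26 + 26² + … + 26^j
def pvPre : Nat → Nat
  | 0 => 0
  | j + 1 => pvPre j + 26 ^ (j + 1)

theorem pvPre_succ (j : Nat) : pvPre (j + 1) = 26 * (pvPre j + 1) := by
  induction j with
  | zero => rfl
  | succ j ih =>
    have h2 : pvPre (j + 1) = pvPre j + 26 ^ (j + 1) := rfl
    calc pvPre (j + 2) = pvPre (j + 1) + 26 ^ (j + 2) := rfl
      _ = 26 * (pvPre j + 1) + 26 ^ (j + 2) := by rw [ih]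
      _ = 26 * ((pvPre j + 26 ^ (j + 1)) + 1) := by ring
      _ = 26 * (pvPre (j + 1) + 1) := by rw [← h2]

-- big-endian base-26 digits of k, padded to i letters (meaningful for k < 26^i)
def pvPad : Nat → Nat → List Char
  | 0, _ => []
  | i + 1, k => pvPad i (k / 26) ++ [Char.ofNat (65 + k % 26)]

theorem pvUnrankAux_append : ∀ (n : Nat) (acc : List Char),
    pvUnrankAux n acc = pvUnrankAux n [] ++ acc := by
  intro n
  induction n using Nat.strong_induction_on with
  | _ n ih =>
    intro acc
    match n with
    | 0 => simp [pvUnrankAux]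
    | m + 1 =>
      have hlt : m / 26 < m + 1 := Nat.lt_succ_of_le (Nat.div_le_self m 26)
      simp only [pvUnrankAux]
      rw [ih _ hlt (Char.ofNat (65 + m % 26) :: acc), ih _ hlt [Char.ofNat (65 + m % 26)]]
      simp

-- unranking correctness: ID number pvPre j + 1 + k is the padded digits of k
theorem pvUnrank_eq_pad : ∀ (j k : Nat), k < 26 ^ (j + 1) →
    pvUnrankAux (pvPre j + 1 + k) [] = pvPad (j + 1) k := by
  intro j
  induction j with
  | zero =>
    intro k hk
    rw [show pvPre 0 + 1 + k = k + 1 from by rw [show pvPre 0 = 0 from rfl]; omega]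
    simp only [pvUnrankAux]
    rw [Nat.div_eq_of_lt (by simpa using hk)]
    simp [pvUnrankAux, pvPad]
  | succ j ih =>
    intro k hk
    have hps : pvPre (j + 1) = 26 * (pvPre j + 1) := pvPre_succ j
    rw [show pvPre (j + 1) + 1 + k = (pvPre (j + 1) + k) + 1 from by omega]
    simp only [pvUnrankAux]
    have hdiv : (pvPre (j + 1) + k) / 26 = pvPre j + 1 + k / 26 := by
      rw [hps, Nat.add_comm, Nat.add_mul_div_left _ _ (by norm_num : 0 < 26)]
      omega
    have hmod : (pvPre (j + 1) + k) % 26 = k % 26 := by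
      rw [hps, Nat.add_comm, Nat.add_mul_mod_self_left]
    have hklt : k / 26 < 26 ^ (j + 1) := by
      have h1 : k < 26 ^ (j + 1) * 26 := by rw [← pow_succ]; exact hk
      exact Nat.div_lt_of_lt_mul (by omega)
    rw [hdiv, hmod, pvUnrankAux_append, ih _ hklt]
    rfl

theorem pvRange_mul (a b : Nat) :
    List.range (a * b) = (List.range a).flatMap (fun i => (List.range b).map (fun j => i * b + j)) := by
  induction a with
  | zero => simp
  | succ a ih =>
    rw [Nat.succ_mul, List.range_add, List.range_succ, List.flatMap_append, ← ih]
    simp [Nat.add_comm]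

theorem pvPad_top : ∀ (n d r : Nat), d < 26 → r < 26 ^ n →
    pvPad (n + 1) (d * 26 ^ n + r) = Char.ofNat (65 + d) :: pvPad n r := by
  intro n
  induction n with
  | zero =>
    intro d r hd hr
    interval_cases r
    simp [pvPad, Nat.mod_eq_of_lt hd]
  | succ n ih =>
    intro d r hd hr
    have key : d * 26 ^ (n + 1) + r = 26 * (d * 26 ^ n) + r := by ring
    have hdiv : (d * 26 ^ (n + 1) + r) / 26 = d * 26 ^ n + r / 26 := by
      rw [key, Nat.add_comm, Nat.add_mul_div_left _ _ (by norm_num : 0 < 26)]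
      omega
    have hmod : (d * 26 ^ (n + 1) + r) % 26 = r % 26 := by
      rw [key, Nat.add_comm, Nat.add_mul_mod_self_left]
    have hrlt : r / 26 < 26 ^ n := by
      have h1 : r < 26 ^ n * 26 := by rw [← pow_succ]; exact hr
      exact Nat.div_lt_of_lt_mul (by omega)
    show pvPad (n + 1) ((d * 26 ^ (n + 1) + r) / 26) ++ [Char.ofNat (65 + (d * 26 ^ (n + 1) + r) % 26)] = _
    rw [hdiv, hmod, ih d (r / 26) hd hrlt]
    rfl

theorem pvUppercase_eq : pvUppercase = (List.range 26).map (fun d => Char.ofNat (65 + d)) := by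
  decide

theorem pvProducts_eq : ∀ n, pvProducts n = (List.range (26 ^ n)).map (pvPad n) := by
  intro n
  induction n with
  | zero => simp [pvProducts, pvPad]
  | succ n ih =>
    show pvUppercase.flatMap (fun c => (pvProducts n).map (fun p => c :: p)) = _
    rw [ih, pvUppercase_eq]
    rw [show (26 : Nat) ^ (n + 1) = 26 * 26 ^ n from by rw [pow_succ]; ring]
    rw [pvRange_mul, List.map_flatMap, List.flatMap_map]
    apply List.flatMap_congr
    intro d hd
    rw [List.map_map, List.map_map]
    apply List.map_congr_left
    intro r hr
    simp only [Function.comp]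
    rw [pvPad_top n d r (List.mem_range.mp hd) (List.mem_range.mp hr)]

-- a drop/range bridge (no such lemma by this exact shape in the library)
theorem pvDropRange (m n : Nat) :
    (List.range n).drop m = (List.range (n - m)).map (fun t => m + t) := by
  rcases Nat.le_total m n with h | h
  · conv_lhs => rw [show n = m + (n - m) from by omega, List.range_add]
    have h2 := List.drop_left (l₁ := List.range m) (l₂ := (List.range (n - m)).map (fun t => m + t))
    simpa using h2
  · have h1 : (List.range n).drop m = [] := by
      apply List.drop_eq_nil_of_le
      simpa using h
    rw [h1, show n - m = 0 from by omega]
    simp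

-- full characterisation of the inner loop: it processes min(end⁺, len) items,
-- skipping the first start of them and yielding the rest
theorem pvInner_spec : ∀ (ps : List (List Char)) (s e : Int) (acc : List String),
    pvInner ps s e acc =
      (if e.toNat < ps.length then s - (min e.toNat ps.length : Nat) - 1
         else s - (min e.toNat ps.length : Nat),
       e - (min e.toNat ps.length : Nat),
       acc ++ ((ps.take (min e.toNat ps.length)).drop s.toNat).map String.mk) := by
  intro ps
  induction ps with
  | nil =>
    intro s e acc
    simp [pvInner]
  | cons p ps ih =>
    intro s e acc
    simp only [pvInner]
    by_cases h1 : e > 0 ∧ s - 1 < 0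
    · rw [if_pos h1, ih]
      obtain ⟨he, hs⟩ := h1
      have hm : min e.toNat (p :: ps).length = min (e - 1).toNat ps.length + 1 := by
        simp only [List.length_cons]
        omega
      refine Prod.ext ?_ (Prod.ext ?_ ?_)
      · simp only [List.length_cons]
        split_ifs <;> push_cast <;> omega
      · simp only [hm]
        push_cast
        omega
      · simp only [hm, List.take_succ_cons]
        have h0 : s.toNat = 0 := by omega
        have h0' : (s - 1).toNat = 0 := by omega
        simp [h0, h0']
    · rw [if_neg h1]
      by_cases h2 : e > 0 ∧ s - 1 > -1
      · rw [if_pos h2, ih]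
        obtain ⟨he, hs⟩ := h2
        have hm : min e.toNat (p :: ps).length = min (e - 1).toNat ps.length + 1 := by
          simp only [List.length_cons]
          omega
        refine Prod.ext ?_ (Prod.ext ?_ ?_)
        · simp only [List.length_cons]
          split_ifs <;> push_cast <;> omega
        · simp only [hm]
          push_cast
          omega
        · simp only [hm, List.take_succ_cons]
          obtain ⟨a, ha⟩ : ∃ a, s.toNat = a + 1 := ⟨s.toNat - 1, by omega⟩
          have ha' : (s - 1).toNat = a := by omega
          rw [ha, ha', List.drop_succ_cons]
      · rw [if_neg h2]
        have he : ¬ e > 0 := by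
          intro he
          by_cases hs : s - 1 < 0
          · exact h1 ⟨he, hs⟩
          · exact h2 ⟨he, by omega⟩
        have h0 : e.toNat = 0 := by omega
        have hl : (p :: ps).length = ps.length + 1 := rfl
        have hm0 : min e.toNat (p :: ps).length = 0 := by omega
        rw [hm0, if_pos (by omega : e.toNat < (p :: ps).length)]
        refine Prod.ext ?_ (Prod.ext ?_ ?_)
        · simp
        · simp
        · simp

-- the outer loop, entered at level j+1 with counters s and e, appends exactly the
-- IDs with absolute numbers pvPre j + 1 + s⁺ … pvPre j + e
theorem pvOuter_spec : ∀ (N j : Nat) (s e : Int) (acc : List String), e.toNat ≤ N →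
    pvOuter (j + 1) s e acc =
      acc ++ (List.range (e.toNat - s.toNat)).map
        (fun t => String.mk (pvUnrankAux (pvPre j + 1 + (s.toNat + t)) [])) := by
  intro N
  induction N using Nat.strong_induction_on with
  | _ N IH =>
    intro j s e acc hN
    rw [pvOuter, pvInner_spec]
    have hlen : (pvProducts (j + 1)).length = 26 ^ (j + 1) := pvProducts_length (j + 1)
    have hLpos : 0 < 26 ^ (j + 1) := by positivity
    simp only [hlen]
    split
    case isTrue h =>
      have hm : min e.toNat (26 ^ (j + 1)) = e.toNat := by omega
      rw [hm] at h ⊢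
      rw [pvProducts_eq, ← List.map_take, List.take_range, ← List.map_drop,
        show min e.toNat (26 ^ (j + 1)) = e.toNat from by omega, pvDropRange, List.map_map,
        List.map_map]
      congr 1
      apply List.map_congr_left
      intro t ht
      have hk : s.toNat + t < 26 ^ (j + 1) := by
        have := List.mem_range.mp ht
        omega
      simp only [Function.comp]
      rw [pvUnrank_eq_pad j _ hk]
    case isFalse h =>
      have hm : min e.toNat (26 ^ (j + 1)) = 26 ^ (j + 1) := by omega
      rw [hm] at h ⊢
      rw [if_neg (by omega : ¬ e.toNat < 26 ^ (j + 1))]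
      have hrec : (e - ((26 ^ (j + 1) : Nat) : Int)).toNat < N := by omega
      rw [IH _ hrec (j + 1) (s - ((26 ^ (j + 1) : Nat) : Int))
          (e - ((26 ^ (j + 1) : Nat) : Int)) _ (le_refl _)]
      rw [pvProducts_eq, ← List.map_take, List.take_range, Nat.min_self, ← List.map_drop,
        pvDropRange, List.map_map, List.map_map]
      rw [show e.toNat - s.toNat
            = (26 ^ (j + 1) - s.toNat)
              + ((e - ((26 ^ (j + 1) : Nat) : Int)).toNat - (s - ((26 ^ (j + 1) : Nat) : Int)).toNat)
          from by omega]
      rw [List.range_add, List.map_append, ← List.append_assoc]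
      congr 1
      · congr 1
        apply List.map_congr_left
        intro t ht
        have hk : s.toNat + t < 26 ^ (j + 1) := by
          have := List.mem_range.mp ht
          omega
        simp only [Function.comp]
        rw [pvUnrank_eq_pad j _ hk]
      · rw [List.map_map]
        apply List.map_congr_left
        intro t ht
        simp only [Function.comp]
        apply congrArg (fun X => String.mk (pvUnrankAux X []))
        have hpre : pvPre (j + 1) = pvPre j + 26 ^ (j + 1) := rfl
        omega

-- ===== VERDICT (by name: the statement is the Claim_ definition above) =====
theorem file_id_generator_spec : Claim_equal_file_id_generator := by
  intro start end_ _
  show file_id_generator start end_ = file_id_generator_alt start end_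
  unfold file_id_generator file_id_generator_alt
  show pvOuter (0 + 1) start end_ []
      = List.map (fun n => String.mk (pvUnrankAux n.toNat []))
          (PySem.List.pyRange ((if start > 0 then start else 0) + 1) (end_ + 1) 1)
  rw [pvOuter_spec end_.toNat 0 start end_ [] (le_refl _), PySem.List.pyRange_one]
  simp only [List.nil_append, List.map_map]
  by_cases hst : start > 0
  · rw [if_pos hst]
    rw [show (end_ + 1 - (start + 1)).toNat = end_.toNat - start.toNat from by omega]
    apply List.map_congr_left
    intro t _
    simp only [Function.comp]
    apply congrArg (fun X => String.mk (pvUnrankAux X []))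
    have h0 : pvPre 0 = 0 := rfl
    omega
  · rw [if_neg hst]
    rw [show (end_ + 1 - (0 + 1)).toNat = end_.toNat - start.toNat from by omega]
    apply List.map_congr_left
    intro t _
    simp only [Function.comp]
    apply congrArg (fun X => String.mk (pvUnrankAux X []))
    have h0 : pvPre 0 = 0 := rfl
    omega
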